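-- pv_equiv track=rewrite | github.com/sachin-khode/tut-scripts | Desktop/Web_Scrp_Flip/stock_prediction.py | find_pos_and_neg
-- ===== SOURCE A (Python) =====
-- def find_pos_and_neg(integers_list):
--     neg_val=-1000
--     pos_val=1000
--     pos_index=1000
--     neg_index=1000
--     try:
--         neg_val = max([n for n in integers_list if n<0])
--         neg_index = integers_list.index(neg_val)
--     except:pass
--     try:
--         pos_val = min([n for n in integers_list if n>0])
--         pos_index = integers_list.index(pos_val)
--     except:pass
--     return pos_val,neg_val,pos_index,neg_index
-- ===== SOURCE B (Python) =====
-- def find_pos_and_neg(integers_list):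
--     # single pass: best-so-far (value, index) pairs; strict comparisons keep the first occurrence
--     pos = None
--     neg = None
--     for i, n in enumerate(integers_list):
--         new_neg = (n, i) if n < 0 and (neg is None or n > neg[0]) else neg
--         new_pos = (n, i) if n > 0 and (pos is None or n < pos[0]) else pos
--         pos, neg = new_pos, new_neg
--     pos_val, pos_index = pos if pos is not None else (1000, 1000)
--     neg_val, neg_index = neg if neg is not None else (-1000, 1000)
--     return pos_val, neg_val, pos_index, neg_index
-- ===== Notes on version B (the rewrite author's own statement) =====
-- stated objective: alternative
-- what changed: Replaces the two filter-comprehensions plus max/min plus two list.index rescans (four passes) with a single enumerate pass maintaining best-so-far (value,index) pairs with strict comparisons.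
import Mathlib
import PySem

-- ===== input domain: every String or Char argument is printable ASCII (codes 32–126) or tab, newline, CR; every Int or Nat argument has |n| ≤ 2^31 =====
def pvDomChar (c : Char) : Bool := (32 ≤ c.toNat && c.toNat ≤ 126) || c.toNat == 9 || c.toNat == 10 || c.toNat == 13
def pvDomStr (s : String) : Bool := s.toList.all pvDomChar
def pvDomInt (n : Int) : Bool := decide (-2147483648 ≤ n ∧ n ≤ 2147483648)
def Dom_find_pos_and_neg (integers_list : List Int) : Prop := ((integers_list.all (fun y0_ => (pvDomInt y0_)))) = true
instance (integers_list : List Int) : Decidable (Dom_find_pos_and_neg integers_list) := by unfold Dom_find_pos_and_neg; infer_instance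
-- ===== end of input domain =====

-- B replaces A's four passes (two filters with max/min plus two list.index rescans) by one
-- enumerate pass keeping best-so-far (value,index) pairs (objective: alternative decomposition).


-- ===== PORT A =====
-- max([n for n in l if n<0]) → PySem.List.max? of the filter (none = the caught ValueError,
-- leaving the defaults); l.index(v) → PySem.List.index? (none branch keeps the 1000 default
-- exactly as the try/except would).
def find_pos_and_neg (integers_list : List Int) : Int × Int × Int × Int :=
  let negPair : Int × Int :=
    match PySem.List.max? (integers_list.filter (fun n => decide (n < 0))) (fun x => x) with
    | none => (-1000, 1000)
    | some m =>
      (m, match PySem.List.index? integers_list m with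
          | none => 1000
          | some i => (i : Int))
  let posPair : Int × Int :=
    match PySem.List.min? (integers_list.filter (fun n => decide (n > 0))) (fun x => x) with
    | none => (1000, 1000)
    | some m =>
      (m, match PySem.List.index? integers_list m with
          | none => 1000
          | some i => (i : Int))
  (posPair.1, negPair.1, posPair.2, negPair.2)

-- ===== PORT B =====
-- the single for-loop over enumerate(l) with the two independent best-so-far accumulators
def find_pos_and_neg_alt (integers_list : List Int) : Int × Int × Int × Int :=
  let st := (PySem.List.enumerate integers_list).foldl
    (fun (s : Option (Int × Int) × Option (Int × Int)) p =>
      (if p.2 > 0 && s.1.all (fun b => decide (p.2 < b.1)) then some (p.2, p.1) else s.1,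
       if p.2 < 0 && s.2.all (fun b => decide (p.2 > b.1)) then some (p.2, p.1) else s.2))
    (none, none)
  let posPair := st.1.getD (1000, 1000)
  let negPair := st.2.getD (-1000, 1000)
  (posPair.1, negPair.1, posPair.2, negPair.2)

-- ===== PRECONDITION & SPEC =====
def Spec_find_pos_and_neg (integers_list : List Int) (out : Int × Int × Int × Int) : Prop := out = find_pos_and_neg_alt integers_list
instance (integers_list : List Int) (out : Int × Int × Int × Int) : Decidable (Spec_find_pos_and_neg integers_list out) := by unfold Spec_find_pos_and_neg; infer_instance

-- ===== CLAIM (what is proved, stated in full; the proofs are below) =====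
def Claim_equal_find_pos_and_neg : Prop := ∀ (integers_list : List Int), Dom_find_pos_and_neg integers_list → Spec_find_pos_and_neg integers_list (find_pos_and_neg integers_list)

-- ===== LEMMAS AND PROOFS =====

-- left-biased "keep the better" merges (ties keep the earlier candidate)
def mergeNeg (s r : Option (Int × Int)) : Option (Int × Int) :=
  match s, r with
  | none, r => r
  | some b, none => some b
  | some b, some c => if b.1 < c.1 then some c else some b

def mergePos (s r : Option (Int × Int)) : Option (Int × Int) :=
  match s, r with
  | none, r => r
  | some b, none => some b
  | some b, some c => if c.1 < b.1 then some c else some b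

-- best negative / positive (value, index) of l, indices starting at k
def bestNeg : List Int → Int → Option (Int × Int)
  | [], _ => none
  | n :: t, k => mergeNeg (if n < 0 then some (n, k) else none) (bestNeg t (k + 1))

def bestPos : List Int → Int → Option (Int × Int)
  | [], _ => none
  | n :: t, k => mergePos (if n > 0 then some (n, k) else none) (bestPos t (k + 1))

theorem mergeNeg_assoc (s x r : Option (Int × Int)) :
    mergeNeg (mergeNeg s x) r = mergeNeg s (mergeNeg x r) := by
  rcases s with _ | b <;> rcases x with _ | c <;> rcases r with _ | d <;>
    repeat first | rfl | (exfalso; omega) | split_ifs | simp only [mergeNeg]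

theorem mergePos_assoc (s x r : Option (Int × Int)) :
    mergePos (mergePos s x) r = mergePos s (mergePos x r) := by
  rcases s with _ | b <;> rcases x with _ | c <;> rcases r with _ | d <;>
    repeat first | rfl | (exfalso; omega) | split_ifs | simp only [mergePos]

theorem stepNeg_eq (s : Option (Int × Int)) (k n : Int) :
    (if n < 0 && s.all (fun b => decide (n > b.1)) then some (n, k) else s)
      = mergeNeg s (if n < 0 then some (n, k) else none) := by
  rcases s with _ | b <;> by_cases h : n < 0 <;>
    repeat first | rfl | (exfalso; omega) | split_ifs | simp_all [mergeNeg]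

theorem stepPos_eq (s : Option (Int × Int)) (k n : Int) :
    (if n > 0 && s.all (fun b => decide (n < b.1)) then some (n, k) else s)
      = mergePos s (if n > 0 then some (n, k) else none) := by
  rcases s with _ | b <;> by_cases h : n > 0 <;>
    repeat first | rfl | (exfalso; omega) | split_ifs | simp_all [mergePos]

theorem negFold_eq (l : List Int) (k : Int) (s : Option (Int × Int)) :
    (PySem.List.enumerate l k).foldl
        (fun s (p : Int × Int) => if p.2 < 0 && s.all (fun b => decide (p.2 > b.1)) then some (p.2, p.1) else s) s
      = mergeNeg s (bestNeg l k) := by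
  induction l generalizing k s with
  | nil => simp [PySem.List.enumerate_nil, bestNeg, mergeNeg]; rcases s with _ | b <;> rfl
  | cons n t ih =>
    rw [PySem.List.enumerate_cons]
    simp only [List.foldl_cons, ih, bestNeg]
    rw [stepNeg_eq, mergeNeg_assoc]

theorem posFold_eq (l : List Int) (k : Int) (s : Option (Int × Int)) :
    (PySem.List.enumerate l k).foldl
        (fun s (p : Int × Int) => if p.2 > 0 && s.all (fun b => decide (p.2 < b.1)) then some (p.2, p.1) else s) s
      = mergePos s (bestPos l k) := by
  induction l generalizing k s with
  | nil => simp [PySem.List.enumerate_nil, bestPos, mergePos]; rcases s with _ | b <;> rfl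
  | cons n t ih =>
    rw [PySem.List.enumerate_cons]
    simp only [List.foldl_cons, ih, bestPos]
    rw [stepPos_eq, mergePos_assoc]

theorem bestNeg_eq (l : List Int) (k : Int) :
    bestNeg l k =
      (PySem.List.max? (l.filter (fun n => decide (n < 0))) (fun x => x)).bind
        (fun m => (PySem.List.index? l m).map (fun (j : Nat) => (m, k + (j : Int)))) := by
  induction l generalizing k with
  | nil => rfl
  | cons n t ih =>
    by_cases hn : n < 0
    · rcases hM : PySem.List.max? (t.filter (fun n => decide (n < 0))) (fun x => x) with _ | m
      · have hft : t.filter (fun n => decide (n < 0)) = [] := by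
          rwa [PySem.List.max?_eq_none_iff] at hM
        have hbt : bestNeg t (k + 1) = none := by rw [ih, hM]; rfl
        have hmax : PySem.List.max? ((n :: t).filter (fun n => decide (n < 0))) (fun x => x)
            = some n := by
          rw [List.filter_cons_of_pos (by simpa using hn), hft, PySem.List.max?_id_cons]
          rfl
        rw [hmax]
        simp only [bestNeg, hbt, if_pos hn, mergeNeg, Option.bind_some]
        rw [PySem.List.index?_cons_self]
        simp
      · have hmem : m ∈ t.filter (fun n => decide (n < 0)) := PySem.List.max?_mem hM
        have hmlt : m < 0 := by simpa using (List.mem_filter.mp hmem).2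
        have hmt : m ∈ t := (List.mem_filter.mp hmem).1
        obtain ⟨j, hj⟩ := Option.isSome_iff_exists.mp
          ((PySem.List.index?_isSome_iff (xs := t) (v := m)).mpr hmt)
        have hbt : bestNeg t (k + 1) = some (m, (k + 1) + (j : Int)) := by
          rw [ih, hM, Option.bind_some, hj]; rfl
        have hmax : PySem.List.max? ((n :: t).filter (fun n => decide (n < 0))) (fun x => x)
            = some (max n m) := by
          rcases hft : t.filter (fun n => decide (n < 0)) with _ | ⟨c, r⟩
          · rw [hft] at hM; simp [PySem.List.max?] at hM
          · rw [hft, PySem.List.max?_id_cons] at hM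
            rw [List.filter_cons_of_pos (by simpa using hn), hft, PySem.List.max?_id_cons,
              List.foldl_cons, List.foldl_assoc, Option.some_inj.mp hM]
        rw [hmax]
        simp only [bestNeg, hbt, if_pos hn, mergeNeg, Option.bind_some]
        by_cases hnm : n < m
        · rw [if_pos hnm, max_eq_right (le_of_lt hnm),
            PySem.List.index?_cons_of_ne t (by omega), hj]
          simp; omega
        · rw [if_neg hnm, max_eq_left (by omega), PySem.List.index?_cons_self]
          simp
    · have hb : bestNeg (n :: t) k = bestNeg t (k + 1) := by
        simp [bestNeg, hn, mergeNeg]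
      have hfc : (n :: t).filter (fun n => decide (n < 0)) = t.filter (fun n => decide (n < 0)) :=
        List.filter_cons_of_neg (by simpa using hn)
      rw [hb, ih, hfc]
      rcases hM : PySem.List.max? (t.filter (fun n => decide (n < 0))) (fun x => x) with _ | m
      · rfl
      · have hmlt : m < 0 := by
          have hmem := PySem.List.max?_mem hM
          simpa using (List.mem_filter.mp hmem).2
        simp only [Option.bind_some]
        rw [PySem.List.index?_cons_of_ne t (by omega)]
        rcases h : PySem.List.index? t m with _ | j
        · rfl
        · simp; omega

theorem bestPos_eq (l : List Int) (k : Int) :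
    bestPos l k =
      (PySem.List.min? (l.filter (fun n => decide (n > 0))) (fun x => x)).bind
        (fun m => (PySem.List.index? l m).map (fun (j : Nat) => (m, k + (j : Int)))) := by
  induction l generalizing k with
  | nil => rfl
  | cons n t ih =>
    by_cases hn : n > 0
    · rcases hM : PySem.List.min? (t.filter (fun n => decide (n > 0))) (fun x => x) with _ | m
      · have hft : t.filter (fun n => decide (n > 0)) = [] := by
          rwa [PySem.List.min?_eq_none_iff] at hM
        have hbt : bestPos t (k + 1) = none := by rw [ih, hM]; rfl
        have hmin : PySem.List.min? ((n :: t).filter (fun n => decide (n > 0))) (fun x => x)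
            = some n := by
          rw [List.filter_cons_of_pos (by simpa using hn), hft, PySem.List.min?_id_cons]
          rfl
        rw [hmin]
        simp only [bestPos, hbt, if_pos hn, mergePos, Option.bind_some]
        rw [PySem.List.index?_cons_self]
        simp
      · have hmem : m ∈ t.filter (fun n => decide (n > 0)) := PySem.List.min?_mem hM
        have hmgt : m > 0 := by simpa using (List.mem_filter.mp hmem).2
        have hmt : m ∈ t := (List.mem_filter.mp hmem).1
        obtain ⟨j, hj⟩ := Option.isSome_iff_exists.mp
          ((PySem.List.index?_isSome_iff (xs := t) (v := m)).mpr hmt)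
        have hbt : bestPos t (k + 1) = some (m, (k + 1) + (j : Int)) := by
          rw [ih, hM, Option.bind_some, hj]; rfl
        have hmin : PySem.List.min? ((n :: t).filter (fun n => decide (n > 0))) (fun x => x)
            = some (min n m) := by
          rcases hft : t.filter (fun n => decide (n > 0)) with _ | ⟨c, r⟩
          · rw [hft] at hM; simp [PySem.List.min?] at hM
          · rw [hft, PySem.List.min?_id_cons] at hM
            rw [List.filter_cons_of_pos (by simpa using hn), hft, PySem.List.min?_id_cons,
              List.foldl_cons, List.foldl_assoc, Option.some_inj.mp hM]
        rw [hmin]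
        simp only [bestPos, hbt, if_pos hn, mergePos, Option.bind_some]
        by_cases hnm : m < n
        · rw [if_pos hnm, min_eq_right (le_of_lt hnm),
            PySem.List.index?_cons_of_ne t (by omega), hj]
          simp; omega
        · rw [if_neg hnm, min_eq_left (by omega), PySem.List.index?_cons_self]
          simp
    · have hb : bestPos (n :: t) k = bestPos t (k + 1) := by
        simp [bestPos, hn, mergePos]
      have hfc : (n :: t).filter (fun n => decide (n > 0)) = t.filter (fun n => decide (n > 0)) :=
        List.filter_cons_of_neg (by simpa using hn)
      rw [hb, ih, hfc]
      rcases hM : PySem.List.min? (t.filter (fun n => decide (n > 0))) (fun x => x) with _ | m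
      · rfl
      · have hmgt : m > 0 := by
          have hmem := PySem.List.min?_mem hM
          simpa using (List.mem_filter.mp hmem).2
        simp only [Option.bind_some]
        rw [PySem.List.index?_cons_of_ne t (by omega)]
        rcases h : PySem.List.index? t m with _ | j
        · rfl
        · simp; omega

-- B's single loop with the paired accumulator is the two independent folds
theorem altFold_split (l : List Int) :
    (PySem.List.enumerate l).foldl
        (fun (s : Option (Int × Int) × Option (Int × Int)) p =>
          (if p.2 > 0 && s.1.all (fun b => decide (p.2 < b.1)) then some (p.2, p.1) else s.1,
           if p.2 < 0 && s.2.all (fun b => decide (p.2 > b.1)) then some (p.2, p.1) else s.2))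
        (none, none)
      = (mergePos none (bestPos l 0), mergeNeg none (bestNeg l 0)) := by
  rw [PySem.List.foldl_prod_mk
    (f := fun s (p : Int × Int) => if p.2 > 0 && s.all (fun b => decide (p.2 < b.1)) then some (p.2, p.1) else s)
    (g := fun s (p : Int × Int) => if p.2 < 0 && s.all (fun b => decide (p.2 > b.1)) then some (p.2, p.1) else s)]
  rw [posFold_eq, negFold_eq]

-- ===== VERDICT (by name: the statement is the Claim_ definition above) =====
theorem find_pos_and_neg_spec : Claim_equal_find_pos_and_neg := by
  intro l _
  show find_pos_and_neg l = find_pos_and_neg_alt l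
  unfold find_pos_and_neg find_pos_and_neg_alt
  rw [altFold_split]
  simp only [mergePos, mergeNeg, bestPos_eq, bestNeg_eq]
  rcases hM : PySem.List.max? (l.filter fun n => decide (n < 0)) (fun x => x) with _ | m <;>
    rcases hP : PySem.List.min? (l.filter fun n => decide (n > 0)) (fun x => x) with _ | p
  · rfl
  · obtain ⟨jp, hjp⟩ := Option.isSome_iff_exists.mp
      ((PySem.List.index?_isSome_iff (xs := l) (v := p)).mpr
        (List.mem_filter.mp (PySem.List.min?_mem hP)).1)
    rw [PySem.List.index?_eq_idxOf?] at hjp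
    simp [hjp]
  · obtain ⟨jm, hjm⟩ := Option.isSome_iff_exists.mp
      ((PySem.List.index?_isSome_iff (xs := l) (v := m)).mpr
        (List.mem_filter.mp (PySem.List.max?_mem hM)).1)
    rw [PySem.List.index?_eq_idxOf?] at hjm
    simp [hjm]
  · obtain ⟨jm, hjm⟩ := Option.isSome_iff_exists.mp
      ((PySem.List.index?_isSome_iff (xs := l) (v := m)).mpr
        (List.mem_filter.mp (PySem.List.max?_mem hM)).1)
    obtain ⟨jp, hjp⟩ := Option.isSome_iff_exists.mp
      ((PySem.List.index?_isSome_iff (xs := l) (v := p)).mpr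
        (List.mem_filter.mp (PySem.List.min?_mem hP)).1)
    rw [PySem.List.index?_eq_idxOf?] at hjm hjp
    simp [hjm, hjp]
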